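-- pv_equiv track=rewrite | github.com/Arun-Sanjay/Dispatch | backend/app/session.py | _build_working_set_from_size
-- ===== SOURCE A (Python) =====
-- from typing import Any, Dict, List, Optional
--
-- def _pid_seed(pid: str) -> int:
--     seed = 0
--     for idx, ch in enumerate(str(pid)):
--         seed = (seed * 131 + (idx + 17) * ord(ch)) & 0x7FFFFFFF
--     return seed or 1
--
-- def _dedupe_pages(values: List[int]) -> List[int]:
--     seen = set()
--     out: List[int] = []
--     for value in values:
--         page = max(0, int(value))
--         if page in seen:
--             continue
--         seen.add(page)
--         out.append(page)
--     return out
--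
-- def _build_working_set_from_size(pid: str, size: int) -> List[int]:
--     count = max(1, min(100, int(size)))
--     seed = _pid_seed(pid)
--     start = seed % 100
--     step = ((seed >> 5) % 99) + 1
--     if step % 2 == 0:
--         step += 1
--     pages: List[int] = []
--     for idx in range(count):
--         pages.append((start + idx * step) % 100)
--     return _dedupe_pages(pages)
-- ===== SOURCE B (Python) =====
-- def _build_working_set_from_size(pid, size):
--     count = max(1, min(100, int(size)))
--     seed = 0
--     for idx, ch in enumerate(str(pid)):
--         seed = (seed * 131 + (idx + 17) * ord(ch)) & 0x7FFFFFFF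
--     seed = seed or 1
--     start = seed % 100
--     step = ((seed >> 5) % 99) + 1
--     if step % 2 == 0:
--         step += 1
--     # step is odd, so gcd(step, 100) is 1, 5 or 25; the progression
--     # (start + i*step) % 100 repeats with period 100 // gcd(step, 100)
--     # and its first `period` terms are pairwise distinct, so no seen-set
--     # dedup pass is needed: just emit the first min(count, period) terms.
--     period = 4 if step % 25 == 0 else (20 if step % 5 == 0 else 100)
--     return [(start + i * step) % 100 for i in range(min(count, period))]
-- ===== Notes on version B (the rewrite author's own statement) =====
-- stated objective: simpler
-- what changed: B drops the seen-set dedup pass entirely: since the forced-odd step makes the progression (start+i*step)%100 have period 100//gcd(step,100) with all first-period terms distinct, B emits the first min(count, period) terms directly by one comprehension.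
import Mathlib
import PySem

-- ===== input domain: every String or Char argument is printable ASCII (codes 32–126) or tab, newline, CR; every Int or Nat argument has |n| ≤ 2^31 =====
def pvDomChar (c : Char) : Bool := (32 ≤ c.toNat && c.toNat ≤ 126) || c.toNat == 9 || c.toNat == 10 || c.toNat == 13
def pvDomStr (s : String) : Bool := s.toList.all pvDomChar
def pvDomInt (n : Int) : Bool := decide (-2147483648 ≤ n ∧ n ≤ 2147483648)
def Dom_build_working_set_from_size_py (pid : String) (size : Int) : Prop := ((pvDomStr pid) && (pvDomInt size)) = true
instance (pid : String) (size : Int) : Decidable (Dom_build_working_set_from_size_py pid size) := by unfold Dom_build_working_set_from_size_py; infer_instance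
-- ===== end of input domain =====

-- B replaces A's generate-all-then-dedup-with-a-seen-set by emitting the first min(count, period)
-- terms of the progression directly (period = 100 // gcd(step, 100), written out for odd step);
-- objective: simpler (one comprehension, no set, no second pass).

-- ===== PORT A =====
def pyPidSeed (pid : String) : Int :=
  let seed := (PySem.List.enumerate pid.toList).foldl
    (fun seed p => PySem.Int.band (seed * 131 + (p.1 + 17) * (p.2.toNat : Int)) 0x7FFFFFFF) 0
  if seed = 0 then 1 else seed

def pyDedupeStep (st : PySem.Set Int × List Int) (value : Int) : PySem.Set Int × List Int :=
  let page := max 0 value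
  if PySem.Set.contains st.1 page then st
  else (PySem.Set.add st.1 page, st.2 ++ [page])

def pyDedupePages (values : List Int) : List Int :=
  (values.foldl pyDedupeStep ((PySem.Set.empty : PySem.Set Int), [])).2

def build_working_set_from_size_py (pid : String) (size : Int) : List Int :=
  let count := max 1 (min 100 size)
  let seed := pyPidSeed pid
  let start := PySem.Int.mod seed 100
  let step0 := PySem.Int.mod (seed >>> 5) 99 + 1
  let step := if PySem.Int.mod step0 2 = 0 then step0 + 1 else step0
  let pages := (PySem.List.pyRange 0 count 1).foldl
      (fun pages idx => pages ++ [PySem.Int.mod (start + idx * step) 100]) []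
  pyDedupePages pages

-- ===== PORT B =====
def build_working_set_from_size_py_alt (pid : String) (size : Int) : List Int :=
  let count := max 1 (min 100 size)
  let seed0 := (PySem.List.enumerate pid.toList).foldl
    (fun seed p => PySem.Int.band (seed * 131 + (p.1 + 17) * (p.2.toNat : Int)) 0x7FFFFFFF) 0
  let seed := if seed0 = 0 then 1 else seed0
  let start := PySem.Int.mod seed 100
  let step0 := PySem.Int.mod (seed >>> 5) 99 + 1
  let step := if PySem.Int.mod step0 2 = 0 then step0 + 1 else step0
  let period : Int := if PySem.Int.mod step 25 = 0 then 4
    else if PySem.Int.mod step 5 = 0 then 20 else 100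
  (PySem.List.pyRange 0 (min count period) 1).map
    (fun i => PySem.Int.mod (start + i * step) 100)

-- ===== PRECONDITION & SPEC =====
def Spec_build_working_set_from_size_py (pid : String) (size : Int) (out : List Int) : Prop := out = build_working_set_from_size_py_alt pid size
instance (pid : String) (size : Int) (out : List Int) : Decidable (Spec_build_working_set_from_size_py pid size out) := by unfold Spec_build_working_set_from_size_py; infer_instance

-- ===== CLAIM (what is proved, stated in full; the proofs are below) =====
def Claim_equal_build_working_set_from_size_py : Prop := ∀ (pid : String) (size : Int), Dom_build_working_set_from_size_py pid size → Spec_build_working_set_from_size_py pid size (build_working_set_from_size_py pid size)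

-- ===== LEMMAS AND PROOFS =====

-- For odd s < 100, d*s ≡ 0 (mod 100) iff d ≡ 0 (mod the period of the progression).
set_option maxRecDepth 10000 in
lemma pvKeyPeriod : ∀ s < 100, s % 2 = 1 → ∀ d < 100,
    ((d * s) % 100 = 0 ↔ d % (if s % 25 = 0 then 4 else if s % 5 = 0 then 20 else 100) = 0) := by
  decide

lemma pvAddCancelMod (a m : Nat) : (a + m) % 100 = a % 100 ↔ m % 100 = 0 := by
  constructor
  · intro h
    have h' : a + m ≡ a + 0 [MOD 100] := by
      simpa [Nat.ModEq] using h
    simpa [Nat.ModEq] using Nat.ModEq.add_left_cancel' a h'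
  · intro h
    have h' : m ≡ 0 [MOD 100] := by simpa [Nat.ModEq] using h
    simpa [Nat.ModEq] using Nat.ModEq.add_left a h'

-- The dedup fold over the first c terms keeps exactly the first min(c, L) terms.
lemma pvDedupeFold (g : Nat → Int) (L : Nat) (hL : 0 < L)
    (hg0 : ∀ i, 0 ≤ g i)
    (hgiff : ∀ i j : Nat, i < j → j < 100 → (g i = g j ↔ (j - i) % L = 0)) :
    ∀ c, c ≤ 100 →
    ((List.range c).map g).foldl pyDedupeStep ((PySem.Set.empty : PySem.Set Int), []) =
      (PySem.Set.ofList ((List.range (min c L)).map g), (List.range (min c L)).map g) := by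
  intro c
  induction c with
  | zero => intro _; simp [PySem.Set.empty, PySem.Set.ofList]
  | succ c ih =>
    intro hc
    have hc' : c ≤ 100 := by omega
    rw [List.range_succ, List.map_append, List.foldl_append, ih hc']
    simp only [List.map_cons, List.map_nil, List.foldl_cons, List.foldl_nil]
    unfold pyDedupeStep
    have hpage : max 0 (g c) = g c := max_eq_right (hg0 c)
    by_cases hcL : c < L
    · have hnot : g c ∉ PySem.Set.ofList ((List.range (min c L)).map g) := by
        rw [PySem.Set.mem_ofList]
        intro hmem
        obtain ⟨i, hi, hgi⟩ := List.mem_map.1 hmem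
        have hic : i < c := by have := List.mem_range.1 hi; omega
        have h0 := (hgiff i c hic (by omega)).1 hgi
        rw [Nat.mod_eq_of_lt (by omega : c - i < L)] at h0
        omega
      have hfalse : PySem.Set.contains (PySem.Set.ofList ((List.range (min c L)).map g)) (g c) = false := by
        rw [← Bool.not_eq_true, PySem.Set.contains_iff]
        exact hnot
      simp only [hpage, hfalse, Bool.false_eq_true, if_false]
      have hmin : min c L = c := by omega
      have hmin' : min (c + 1) L = c + 1 := by omega
      rw [hmin, hmin', List.range_succ, List.map_append, List.map_singleton,
        PySem.Set.ofList_append_singleton]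
    · have hLc : L ≤ c := by omega
      have hmem : g c ∈ PySem.Set.ofList ((List.range (min c L)).map g) := by
        rw [PySem.Set.mem_ofList]
        have hmlt : c % L < L := Nat.mod_lt c hL
        refine List.mem_map.2 ⟨c % L, List.mem_range.2 ?_, ?_⟩
        · omega
        · have hic : c % L < c := by omega
          refine (hgiff (c % L) c hic (by omega)).2 ?_
          have hdm : c - c % L = L * (c / L) := by
            have := Nat.div_add_mod c L
            omega
          rw [hdm]
          exact Nat.mul_mod_right L (c / L)
      have htrue : PySem.Set.contains (PySem.Set.ofList ((List.range (min c L)).map g)) (g c) = true :=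
        (PySem.Set.contains_iff _ _).2 hmem
      simp only [hpage, htrue, if_true]
      have hmin : min (c + 1) L = min c L := by omega
      rw [hmin]

-- Assembly: for in-range start/step/count the deduped progression is its first min(count, period) terms.
lemma pvCore (start step count : Int)
    (h1 : 1 ≤ count) (h2 : count ≤ 100)
    (hst0 : 0 ≤ start) (_hst1 : start < 100)
    (hs0 : 0 < step) (hs1 : step < 100) (hodd : PySem.Int.mod step 2 = 1) :
    pyDedupePages ((PySem.List.pyRange 0 count 1).foldl
        (fun pages idx => pages ++ [PySem.Int.mod (start + idx * step) 100]) []) =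
      (PySem.List.pyRange 0 (min count (if PySem.Int.mod step 25 = 0 then (4 : Int)
          else if PySem.Int.mod step 5 = 0 then 20 else 100)) 1).map
        (fun i => PySem.Int.mod (start + i * step) 100) := by
  lift start to ℕ using hst0 with st
  lift step to ℕ using (le_of_lt hs0) with s
  lift count to ℕ using (by omega : (0:Int) ≤ count) with c
  have hs100 : s < 100 := by exact_mod_cast hs1
  have hsodd : s % 2 = 1 := by
    have := PySem.Int.mod_natCast s 2
    simp only [Nat.cast_ofNat] at this
    rw [this] at hodd
    exact_mod_cast hodd
  have hm25 : PySem.Int.mod (s : Int) 25 = ((s % 25 : Nat) : Int) := by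
    exact_mod_cast PySem.Int.mod_natCast s 25
  have hm5 : PySem.Int.mod (s : Int) 5 = ((s % 5 : Nat) : Int) := by
    exact_mod_cast PySem.Int.mod_natCast s 5
  set L : Nat := if s % 25 = 0 then 4 else if s % 5 = 0 then 20 else 100 with hLdef
  have hL0 : 0 < L := by rw [hLdef]; split_ifs <;> norm_num
  have hLle : L ≤ 100 := by rw [hLdef]; split_ifs <;> norm_num
  have hLcast : (if PySem.Int.mod (s:Int) 25 = 0 then (4 : Int)
      else if PySem.Int.mod (s:Int) 5 = 0 then 20 else 100) = ((L : Nat) : Int) := by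
    rw [hm25, hm5, hLdef]
    simp only [Nat.cast_eq_zero]
    split_ifs <;> norm_num
  set g : Nat → Int := fun k => PySem.Int.mod ((st : Int) + (k : Int) * (s : Int)) 100 with hgdef
  have hg : ∀ k : Nat, g k = (((st + k * s) % 100 : Nat) : Int) := by
    intro k
    have hc : (st : Int) + (k : Int) * (s : Int) = ((st + k * s : Nat) : Int) := by push_cast; ring
    rw [hgdef]
    simp only [hc]
    exact_mod_cast PySem.Int.mod_natCast (st + k * s) 100
  have hg0 : ∀ k, 0 ≤ g k := by
    intro k; rw [hg]; exact_mod_cast Nat.zero_le _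
  have hgiff : ∀ i j : Nat, i < j → j < 100 → (g i = g j ↔ (j - i) % L = 0) := by
    intro i j hij hj
    rw [hg, hg, Nat.cast_inj]
    have hd : st + j * s = (st + i * s) + (j - i) * s := by
      have h' : j = i + (j - i) := by omega
      calc st + j * s = st + (i + (j - i)) * s := by rw [← h']
        _ = (st + i * s) + (j - i) * s := by ring
    rw [hd, eq_comm, pvAddCancelMod]
    exact pvKeyPeriod s hs100 hsodd (j - i) (by omega)
  -- rewrite both sides into List.range form
  rw [hLcast, ← Nat.cast_min, PySem.List.pyRange_zero_nat, PySem.List.pyRange_zero_nat,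
    PySem.List.foldl_append_singleton_eq_map, List.nil_append, List.map_map, List.map_map]
  unfold pyDedupePages
  have hfold := pvDedupeFold g L hL0 hg0 hgiff c (by exact_mod_cast h2)
  have hcomp : ((fun i => PySem.Int.mod ((st:Int) + i * (s:Int)) 100) ∘ fun (k : Nat) => (k : Int)) = g := by
    funext k; simp [hgdef, Function.comp]
  rw [hcomp, hfold]

-- ===== VERDICT (by name: the statement is the Claim_ definition above) =====
theorem build_working_set_from_size_py_spec : Claim_equal_build_working_set_from_size_py := by
  intro pid size _
  unfold Spec_build_working_set_from_size_py
  unfold build_working_set_from_size_py build_working_set_from_size_py_alt pyPidSeed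
  simp only []
  set seed0 := (PySem.List.enumerate pid.toList).foldl
    (fun seed p => PySem.Int.band (seed * 131 + (p.1 + 17) * (p.2.toNat : Int)) 0x7FFFFFFF) 0 with hseed0
  set seed := if seed0 = 0 then 1 else seed0 with hseed
  set count := max 1 (min 100 size) with hcount
  set t := PySem.Int.mod (seed >>> 5) 99 with ht
  have ht0 : 0 ≤ t := PySem.Int.mod_nonneg _ (by norm_num)
  have ht1 : t < 99 := PySem.Int.mod_lt _ (by norm_num)
  set step := if PySem.Int.mod (t + 1) 2 = 0 then t + 1 + 1 else t + 1 with hstep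
  have hmod2 : ∀ a : Int, PySem.Int.mod a 2 = a % 2 := fun a => PySem.Int.mod_eq_emod_of_pos (by norm_num)
  have hs0 : 0 < step := by rw [hstep]; split_ifs <;> omega
  have hs1 : step < 100 := by
    rw [hstep]
    split_ifs with h
    · rw [hmod2] at h; omega
    · omega
  have hodd : PySem.Int.mod step 2 = 1 := by
    rw [hstep]
    split_ifs with h <;> rw [hmod2] at * <;> omega
  exact pvCore (PySem.Int.mod seed 100) step count
    (by omega) (by omega)
    (PySem.Int.mod_nonneg _ (by norm_num)) (PySem.Int.mod_lt _ (by norm_num))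
    hs0 hs1 hodd
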